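-- pv_equiv track=rewrite | github.com/CERT-Polska/karton-archive-extractor | karton/archive_extractor/package_heuristics.py | _detect_electron_app
-- ===== SOURCE A (Python) =====
-- def _detect_electron_app(classified: dict[str, list[str]]) -> bool:
--     """Detect if archive contains an Electron application"""
--     all_files = []
--     for files in classified.values():
--         all_files.extend(files)
--
--     all_names_lower = [f.lower() for f in all_files]
--
--     electron_indicators = [
--         "app.asar",
--         "electron.exe",
--         "package.json",
--         "resources/app.asar",
--         "resources/default_app.asar",
--     ]
--
--     matches = sum(
--         1 for indicator in electron_indicators if indicator in all_names_lower
--     )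
--     return matches >= 2
-- ===== SOURCE B (Python) =====
-- def _detect_electron_app(classified: dict[str, list[str]]) -> bool:
--     """Detect if archive contains an Electron application"""
--     indicators = {
--         "app.asar",
--         "electron.exe",
--         "package.json",
--         "resources/app.asar",
--         "resources/default_app.asar",
--     }
--     found = set()
--     for files in classified.values():
--         for f in files:
--             name = f.lower()
--             if name in indicators:
--                 found.add(name)
--     return len(found) >= 2
-- ===== Notes on version B (the rewrite author's own statement) =====
-- stated objective: alternative
-- what changed: Instead of flattening all file names into one list and scanning it once per indicator (5 repeated membership scans), B indexes the 5 indicators in a set and makes a single forward pass over the files, collecting the distinct matched indicators in a set and comparing its size to 2.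
import Mathlib
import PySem

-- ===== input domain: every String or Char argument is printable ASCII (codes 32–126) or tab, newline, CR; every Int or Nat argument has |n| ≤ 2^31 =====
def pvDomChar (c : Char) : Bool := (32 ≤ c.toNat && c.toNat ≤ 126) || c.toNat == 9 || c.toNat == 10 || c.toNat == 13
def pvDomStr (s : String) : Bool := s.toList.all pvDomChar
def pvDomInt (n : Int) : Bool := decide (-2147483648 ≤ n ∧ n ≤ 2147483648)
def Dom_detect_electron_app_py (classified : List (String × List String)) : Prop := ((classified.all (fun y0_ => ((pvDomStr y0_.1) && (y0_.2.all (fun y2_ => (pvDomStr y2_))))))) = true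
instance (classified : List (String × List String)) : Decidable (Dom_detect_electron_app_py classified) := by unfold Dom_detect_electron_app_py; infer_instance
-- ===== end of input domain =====

-- B replaces A's five membership scans over the flattened lowered name-list by one
-- forward pass over the files against an indicator set, collecting matched indicators
-- in a 'found' set and comparing its size with 2 (objective: alternative).

-- ===== PORT A =====
def electronIndicators : List String :=
  ["app.asar", "electron.exe", "package.json", "resources/app.asar", "resources/default_app.asar"]

def detect_electron_app_py (classified : List (String × List String)) : Bool :=
  let all_files := classified.foldl (fun acc kv => acc ++ kv.2) []
  let all_names_lower := all_files.map PySem.Str.lower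
  let nmatches : Int :=
    electronIndicators.foldl (fun n i => if all_names_lower.contains i then n + 1 else n) 0
  decide (nmatches ≥ 2)

-- ===== PORT B =====
def electronIndicatorSet : PySem.Set String :=
  PySem.Set.ofList
    ["app.asar", "electron.exe", "package.json", "resources/app.asar", "resources/default_app.asar"]

def detect_electron_app_py_alt (classified : List (String × List String)) : Bool :=
  let found : PySem.Set String :=
    classified.foldl (fun fs kv =>
      kv.2.foldl (fun fs f =>
        let name := PySem.Str.lower f
        if PySem.Set.contains electronIndicatorSet name then PySem.Set.add fs name else fs)
        fs)
      PySem.Set.empty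
  decide (PySem.Set.len found ≥ 2)

-- ===== PRECONDITION & SPEC =====
def Spec_detect_electron_app_py (classified : List (String × List String)) (out : Bool) : Prop := out = detect_electron_app_py_alt classified
instance (classified : List (String × List String)) (out : Bool) : Decidable (Spec_detect_electron_app_py classified out) := by unfold Spec_detect_electron_app_py; infer_instance

-- ===== CLAIM (what is proved, stated in full; the proofs are below) =====
def Claim_equal_detect_electron_app_py : Prop := ∀ (classified : List (String × List String)), Dom_detect_electron_app_py classified → Spec_detect_electron_app_py classified (detect_electron_app_py classified)

-- ===== LEMMAS AND PROOFS =====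

-- A's counting loop counts the indicators that occur in the name list.
theorem foldl_count_eq (p : String → Bool) (l : List String) (n : Int) :
    l.foldl (fun n i => if p i then n + 1 else n) n = n + (l.countP p : Int) := by
  induction l generalizing n with
  | nil => simp
  | cons x xs ih =>
      simp only [List.foldl_cons, List.countP_cons, ih]
      by_cases h : p x = true <;> simp [h] <;> omega

-- membership in B's inner loop's accumulator
theorem mem_inner (files : List String) (fs : PySem.Set String) (x : String) :
    x ∈ files.foldl (fun fs f =>
        if PySem.Set.contains electronIndicatorSet (PySem.Str.lower f)
        then PySem.Set.add fs (PySem.Str.lower f) else fs) fs ↔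
      x ∈ fs ∨ (x ∈ electronIndicatorSet ∧ x ∈ files.map PySem.Str.lower) := by
  induction files generalizing fs with
  | nil => simp
  | cons f rest ih =>
      simp only [List.foldl_cons, List.map_cons, List.mem_cons]
      by_cases h : PySem.Set.contains electronIndicatorSet (PySem.Str.lower f) = true
      · rw [if_pos h, ih]
        rw [PySem.Set.contains_iff] at h
        simp only [PySem.Set.mem_add]
        constructor
        · rintro ((hx | rfl) | ⟨hi, hn⟩)
          · exact .inl hx
          · exact .inr ⟨h, .inl rfl⟩
          · exact .inr ⟨hi, .inr hn⟩
        · rintro (hx | ⟨hi, rfl | hn⟩)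
          · exact .inl (.inl hx)
          · exact .inl (.inr rfl)
          · exact .inr ⟨hi, hn⟩
      · rw [if_neg h, ih]
        rw [PySem.Set.contains_iff] at h
        constructor
        · rintro (hx | ⟨hi, hn⟩)
          · exact .inl hx
          · exact .inr ⟨hi, .inr hn⟩
        · rintro (hx | ⟨hi, rfl | hn⟩)
          · exact .inl hx
          · exact absurd hi h
          · exact .inr ⟨hi, hn⟩

-- nodup preserved by the inner loop
theorem nodup_inner (files : List String) (fs : PySem.Set String) (h : fs.Nodup) :
    (files.foldl (fun fs f =>
        if PySem.Set.contains electronIndicatorSet (PySem.Str.lower f)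
        then PySem.Set.add fs (PySem.Str.lower f) else fs) fs).Nodup := by
  induction files generalizing fs with
  | nil => exact h
  | cons f rest ih =>
      simp only [List.foldl_cons]
      split
      · exact ih _ (PySem.Set.nodup_add _ _ h)
      · exact ih _ h

-- membership in B's outer loop's accumulator
theorem mem_outer (classified : List (String × List String)) (fs : PySem.Set String) (x : String) :
    x ∈ classified.foldl (fun fs kv =>
        kv.2.foldl (fun fs f =>
          if PySem.Set.contains electronIndicatorSet (PySem.Str.lower f)
          then PySem.Set.add fs (PySem.Str.lower f) else fs) fs) fs ↔
      x ∈ fs ∨ (x ∈ electronIndicatorSet ∧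
        x ∈ (classified.foldl (fun acc kv => acc ++ kv.2) []).map PySem.Str.lower) := by
  rw [PySem.List.foldl_append_eq_flatMap]
  induction classified generalizing fs with
  | nil => simp
  | cons kv rest ih =>
      simp only [List.foldl_cons, List.flatMap_cons, List.map_append, List.mem_append, ih, mem_inner]
      tauto

theorem nodup_outer (classified : List (String × List String)) (fs : PySem.Set String)
    (h : fs.Nodup) :
    (classified.foldl (fun fs kv =>
        kv.2.foldl (fun fs f =>
          if PySem.Set.contains electronIndicatorSet (PySem.Str.lower f)
          then PySem.Set.add fs (PySem.Str.lower f) else fs) fs) fs).Nodup := by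
  induction classified generalizing fs with
  | nil => exact h
  | cons kv rest ih => exact ih _ (nodup_inner _ _ h)

-- ===== VERDICT (by name: the statement is the Claim_ definition above) =====
theorem detect_electron_app_py_spec : Claim_equal_detect_electron_app_py := by
  intro classified _
  unfold Spec_detect_electron_app_py detect_electron_app_py detect_electron_app_py_alt
  dsimp only
  set names := (classified.foldl (fun acc kv => acc ++ kv.2) []).map PySem.Str.lower with hnames
  set found := classified.foldl (fun fs kv =>
      kv.2.foldl (fun fs f =>
        if PySem.Set.contains electronIndicatorSet (PySem.Str.lower f)
        then PySem.Set.add fs (PySem.Str.lower f) else fs) fs) PySem.Set.empty with hfound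
  have hmem : ∀ x, x ∈ found ↔ x ∈ electronIndicatorSet ∧ x ∈ names := by
    intro x
    rw [hfound, mem_outer]
    simp only [PySem.Set.empty, List.not_mem_nil, false_or]
    exact Iff.rfl
  have hnd : found.Nodup := nodup_outer _ _ List.nodup_nil
  have hperm : found.Perm (electronIndicators.filter (fun i => names.contains i)) := by
    refine (List.perm_ext_iff_of_nodup hnd (List.Nodup.filter _ (by decide))).mpr ?_
    intro x
    rw [hmem, List.mem_filter]
    constructor
    · rintro ⟨hi, hn⟩
      exact ⟨by simpa [electronIndicatorSet, electronIndicators, PySem.Set.mem_ofList] using hi,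
             by simpa using hn⟩
    · rintro ⟨hi, hn⟩
      exact ⟨by simpa [electronIndicatorSet, electronIndicators, PySem.Set.mem_ofList] using hi,
             by simpa using hn⟩
  have hlen : PySem.Set.len found = ((electronIndicators.countP (fun i => names.contains i) : Nat) : Int) := by
    have h1 := hperm.length_eq
    rw [← List.countP_eq_length_filter] at h1
    simp [PySem.Set.len, h1]
  have hpred : List.countP (fun i => names.contains i) electronIndicators
      = List.countP (fun i => decide (i ∈ names)) electronIndicators :=
    List.countP_congr (fun x _ => by simp)
  rw [foldl_count_eq, hlen]
  norm_num [hpred]
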